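-- pv_equiv track=rewrite | github.com/TimothyKimes-Walmart/Lucernex-Project-Dashboard | app/queries_po.py | _build_po_search_clause
-- ===== SOURCE A (Python) =====
-- PO_SEARCH_FIELDS: dict[str, dict] = {
--     "po_number":      {"label": "PO Number",   "col": "po.po_number"},
--     "vendor":         {"label": "Vendor",      "col": "po.vendor"},
--     "store":          {"label": "Store",       "col": "p.store"},
--     "store_sequence": {"label": "Store+Seq",   "col": "p.store_sequence"},
--     "city":           {"label": "City",        "col": "p.city"},
--     "state":          {"label": "State",       "col": "p.state"},
--     "sap_def":        {"label": "SAP Def",     "col": "po.sap_project_definition"},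
--     "status":         {"label": "Proj Status", "col": "p.project_status"},
--     "project_id":     {"label": "Entity ID",   "col": "p.project_id"},
--     "project_type":   {"label": "Proj Type",   "col": "p.project_type"},
--     "scope":          {"label": "Scope",       "col": "p.brief_scope_of_work"},
--     "contractor":     {"label": "Contractor",  "col": "p.general_contractor"},
--     "banner":         {"label": "Banner",      "col": "p.banner"},
-- }
--
-- _ALL_PO_FIELD_KEYS = list(PO_SEARCH_FIELDS.keys())
--
-- def _build_po_search_clause(
--     search: str | None,
--     fields: list[str] | None = None,
-- ) -> tuple[str, list]:
--     """Build WHERE fragment for PO multi-term search."""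
--     if not search:
--         return "", []
--     terms = [t.strip() for t in search.split(";") if t.strip()]
--     if not terms:
--         return "", []
--     active = fields if fields else _ALL_PO_FIELD_KEYS
--     clauses: list[str] = []
--     params: list = []
--     for term in terms:
--         like = f"%{term}%"
--         or_parts: list[str] = []
--         for key in active:
--             meta = PO_SEARCH_FIELDS.get(key)
--             if meta:
--                 or_parts.append(f"{meta['col']} LIKE ?")
--                 params.append(like)
--         if or_parts:
--             clauses.append(f"({' OR '.join(or_parts)})")
--     if not clauses:
--         return "", []
--     return f" AND ({' AND '.join(clauses)})", params
-- ===== SOURCE B (Python) =====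
-- PO_SEARCH_FIELDS: dict[str, dict] = {
--     "po_number":      {"label": "PO Number",   "col": "po.po_number"},
--     "vendor":         {"label": "Vendor",      "col": "po.vendor"},
--     "store":          {"label": "Store",       "col": "p.store"},
--     "store_sequence": {"label": "Store+Seq",   "col": "p.store_sequence"},
--     "city":           {"label": "City",        "col": "p.city"},
--     "state":          {"label": "State",       "col": "p.state"},
--     "sap_def":        {"label": "SAP Def",     "col": "po.sap_project_definition"},
--     "status":         {"label": "Proj Status", "col": "p.project_status"},
--     "project_id":     {"label": "Entity ID",   "col": "p.project_id"},
--     "project_type":   {"label": "Proj Type",   "col": "p.project_type"},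
--     "scope":          {"label": "Scope",       "col": "p.brief_scope_of_work"},
--     "contractor":     {"label": "Contractor",  "col": "p.general_contractor"},
--     "banner":         {"label": "Banner",      "col": "p.banner"},
-- }
--
-- _ALL_PO_FIELD_KEYS = list(PO_SEARCH_FIELDS.keys())
--
--
-- def _build_po_search_clause(search, fields=None):
--     """Build WHERE fragment for PO multi-term search, recursively.
--
--     Instead of accumulating clause/param lists and joining at the end,
--     resolve the columns once and build the joined SQL strings directly
--     by structural recursion on the column list and the term list.
--     """
--     if not search:
--         return "", []
--     terms = [t.strip() for t in search.split(";") if t.strip()]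
--     active = fields if fields else _ALL_PO_FIELD_KEYS
--     cols = [PO_SEARCH_FIELDS[k]["col"] for k in active if k in PO_SEARCH_FIELDS]
--     if not terms or not cols:
--         return "", []
--
--     def _ors(cs):
--         head = cs[0] + " LIKE ?"
--         return head if len(cs) == 1 else head + " OR " + _ors(cs[1:])
--
--     unit = "(" + _ors(cols) + ")"
--
--     def _go(ts):
--         likes = ["%" + ts[0] + "%"] * len(cols)
--         if len(ts) == 1:
--             return unit, likes
--         body, rest = _go(ts[1:])
--         return unit + " AND " + body, likes + rest
--
--     body, params = _go(terms)
--     return " AND (" + body + ")", params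
-- ===== Notes on version B (the rewrite author's own statement) =====
-- stated objective: alternative
-- what changed: Replaces A's iterative accumulate-lists-then-join construction with structural recursion: columns are resolved once, the OR fragment and the AND-joined body are built directly by recursion on the column and term lists (no clause/param accumulator lists, no join calls), with params emitted by list replication per term.
import Mathlib
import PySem

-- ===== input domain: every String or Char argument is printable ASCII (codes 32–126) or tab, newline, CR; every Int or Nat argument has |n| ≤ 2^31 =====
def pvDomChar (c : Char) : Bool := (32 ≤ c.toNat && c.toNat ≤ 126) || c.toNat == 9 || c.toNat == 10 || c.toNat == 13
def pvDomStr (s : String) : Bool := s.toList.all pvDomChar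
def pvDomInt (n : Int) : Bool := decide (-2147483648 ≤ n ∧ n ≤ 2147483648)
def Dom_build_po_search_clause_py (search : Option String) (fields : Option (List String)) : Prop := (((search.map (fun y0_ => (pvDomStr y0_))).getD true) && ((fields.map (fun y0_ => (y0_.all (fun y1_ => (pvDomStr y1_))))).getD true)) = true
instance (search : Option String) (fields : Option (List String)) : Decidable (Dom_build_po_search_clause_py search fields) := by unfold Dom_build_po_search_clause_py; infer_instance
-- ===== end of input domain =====

-- B resolves the columns once and builds the joined SQL strings directly by structural
-- recursion on the column and term lists, instead of A's accumulator lists + join calls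
-- (objective: alternative decomposition, same cost).

-- ===== PORT A =====
-- PO_SEARCH_FIELDS, keeping only the 'col' value the function reads
def pvPOFields : PySem.Dict String String :=
  PySem.Dict.ofList [("po_number","po.po_number"), ("vendor","po.vendor"), ("store","p.store"),
    ("store_sequence","p.store_sequence"), ("city","p.city"), ("state","p.state"),
    ("sap_def","po.sap_project_definition"), ("status","p.project_status"),
    ("project_id","p.project_id"), ("project_type","p.project_type"),
    ("scope","p.brief_scope_of_work"), ("contractor","p.general_contractor"), ("banner","p.banner")]

def pvAllKeys : List String := pvPOFields.keys

def build_po_search_clause_py (search : Option String) (fields : Option (List String)) : String × List String :=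
  match search with
  | none => ("", [])
  | some s =>
    if s = "" then ("", []) else
    let terms := (((PySem.Str.split? s ";").getD []).map PySem.Str.strip).filter (fun t => t ≠ "")
    if terms = [] then ("", []) else
    let active := match fields with
      | some fs => if fs = [] then pvAllKeys else fs
      | none => pvAllKeys
    let cp := terms.foldl (fun (st : List String × List String) term =>
      let like := "%" ++ term ++ "%"
      let op := active.foldl (fun (st2 : List String × List String) key =>
        match pvPOFields.get? key with
        | some col => (st2.1 ++ [col ++ " LIKE ?"], st2.2 ++ [like])
        | none => st2) ([], st.2)
      if op.1 = [] then (st.1, op.2)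
      else (st.1 ++ ["(" ++ PySem.Str.join " OR " op.1 ++ ")"], op.2)) ([], [])
    if cp.1 = [] then ("", [])
    else (" AND (" ++ PySem.Str.join " AND " cp.1 ++ ")", cp.2)

-- ===== PORT B =====
-- Source B's _ors: join the LIKE parts by recursion on the column list (only called on ≠ []).
def pvOrs : List String → String
  | [] => ""
  | [c] => c ++ " LIKE ?"
  | c :: c' :: rest => c ++ " LIKE ?" ++ " OR " ++ pvOrs (c' :: rest)

-- Source B's _go: build the AND-joined body and the params by recursion on the term list.
def pvGo (unit : String) (m : Nat) : List String → String × List String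
  | [] => ("", [])
  | [t] => (unit, List.replicate m ("%" ++ t ++ "%"))
  | t :: t' :: rest =>
    let r := pvGo unit m (t' :: rest)
    (unit ++ " AND " ++ r.1, List.replicate m ("%" ++ t ++ "%") ++ r.2)

def build_po_search_clause_py_alt (search : Option String) (fields : Option (List String)) : String × List String :=
  match search with
  | none => ("", [])
  | some s =>
    if s = "" then ("", []) else
    let terms := (((PySem.Str.split? s ";").getD []).map PySem.Str.strip).filter (fun t => t ≠ "")
    let active := match fields with
      | some fs => if fs = [] then pvAllKeys else fs
      | none => pvAllKeys
    let cols := active.filterMap (fun k => pvPOFields.get? k)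
    if terms = [] ∨ cols = [] then ("", []) else
    let unit := "(" ++ pvOrs cols ++ ")"
    let r := pvGo unit cols.length terms
    (" AND (" ++ r.1 ++ ")", r.2)

-- ===== PRECONDITION & SPEC =====
def Spec_build_po_search_clause_py (search : Option String) (fields : Option (List String)) (out : String × List String) : Prop := out = build_po_search_clause_py_alt search fields
instance (search : Option String) (fields : Option (List String)) (out : String × List String) : Decidable (Spec_build_po_search_clause_py search fields out) := by unfold Spec_build_po_search_clause_py; infer_instance

-- ===== CLAIM (what is proved, stated in full; the proofs are below) =====
def Claim_equal_build_po_search_clause_py : Prop := ∀ (search : Option String) (fields : Option (List String)), Dom_build_po_search_clause_py search fields → Spec_build_po_search_clause_py search fields (build_po_search_clause_py search fields)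

-- ===== LEMMAS AND PROOFS =====

theorem pv_join_singleton (s a : String) : PySem.Str.join s [a] = a := by
  apply String.toList_injective
  simp [PySem.Str.join, PySem.Chars.join_singleton]

theorem pv_join_cons (s a b : String) (xs : List String) :
    PySem.Str.join s (a :: b :: xs) = a ++ s ++ PySem.Str.join s (b :: xs) := by
  apply String.toList_injective
  simp [PySem.Str.join, PySem.Chars.join_cons_cons]

-- A's inner loop over the active keys appends the resolved columns and one param per hit.
theorem pv_inner (active : List String) (like : String) (o p : List String) :
    active.foldl (fun (st2 : List String × List String) key =>
        match pvPOFields.get? key with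
        | some col => (st2.1 ++ [col ++ " LIKE ?"], st2.2 ++ [like])
        | none => st2) (o, p)
      = (o ++ (active.filterMap (fun k => pvPOFields.get? k)).map (fun c => c ++ " LIKE ?"),
         p ++ (active.filterMap (fun k => pvPOFields.get? k)).map (fun _ => like)) := by
  induction active generalizing o p with
  | nil => simp
  | cons k rest ih =>
    simp only [List.foldl_cons, List.filterMap_cons]
    cases h : pvPOFields.get? k with
    | none => simpa using ih o p
    | some col => simp [ih, List.append_assoc]

-- A's outer loop over the terms, when at least one column resolves.
theorem pv_outer (terms : List String) (active : List String)
    (vc : List String) (hvc : vc = active.filterMap (fun k => pvPOFields.get? k)) (hne : vc ≠ [])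
    (c p : List String) :
    terms.foldl (fun (st : List String × List String) term =>
      let like := "%" ++ term ++ "%"
      let op := active.foldl (fun (st2 : List String × List String) key =>
        match pvPOFields.get? key with
        | some col => (st2.1 ++ [col ++ " LIKE ?"], st2.2 ++ [like])
        | none => st2) ([], st.2)
      if op.1 = [] then (st.1, op.2)
      else (st.1 ++ ["(" ++ PySem.Str.join " OR " op.1 ++ ")"], op.2)) (c, p)
    = (c ++ terms.map (fun _ => "(" ++ PySem.Str.join " OR " (vc.map (fun cc => cc ++ " LIKE ?")) ++ ")"),
       p ++ terms.flatMap (fun t => vc.map (fun _ => "%" ++ t ++ "%"))) := by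
  induction terms generalizing c p with
  | nil => simp
  | cons t rest ih =>
    simp only [List.foldl_cons]
    rw [pv_inner]
    have hmapne : (active.filterMap (fun k => pvPOFields.get? k)).map (fun c => c ++ " LIKE ?") ≠ [] := by
      rw [← hvc]; simpa using hne
    simp only [List.nil_append, hmapne]
    rw [ih]
    simp [hvc, List.append_assoc]

-- A's outer loop when no column resolves: nothing is ever added.
theorem pv_outer_empty (terms : List String) (active : List String)
    (hvc : active.filterMap (fun k => pvPOFields.get? k) = []) (c p : List String) :
    terms.foldl (fun (st : List String × List String) term =>
      let like := "%" ++ term ++ "%"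
      let op := active.foldl (fun (st2 : List String × List String) key =>
        match pvPOFields.get? key with
        | some col => (st2.1 ++ [col ++ " LIKE ?"], st2.2 ++ [like])
        | none => st2) ([], st.2)
      if op.1 = [] then (st.1, op.2)
      else (st.1 ++ ["(" ++ PySem.Str.join " OR " op.1 ++ ")"], op.2)) (c, p) = (c, p) := by
  induction terms generalizing c p with
  | nil => rfl
  | cons t rest ih =>
    simp only [List.foldl_cons]
    rw [pv_inner]
    simp [hvc, ih]

-- B's _ors builds exactly the ' OR '-join of the LIKE parts.
theorem pv_ors_eq (cols : List String) (h : cols ≠ []) :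
    pvOrs cols = PySem.Str.join " OR " (cols.map (fun c => c ++ " LIKE ?")) := by
  induction cols with
  | nil => exact absurd rfl h
  | cons c rest ih =>
    cases rest with
    | nil => simp [pvOrs, pv_join_singleton]
    | cons c' rest' =>
      rw [show pvOrs (c :: c' :: rest') = c ++ " LIKE ?" ++ " OR " ++ pvOrs (c' :: rest') from rfl,
          ih (by simp)]
      simp only [List.map_cons]
      rw [pv_join_cons]

-- B's _go builds exactly the ' AND '-join of n copies of unit and the replicated params.
theorem pv_go_eq (unit : String) (m : Nat) (terms : List String) (h : terms ≠ []) :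
    pvGo unit m terms
      = (PySem.Str.join " AND " (terms.map (fun _ => unit)),
         terms.flatMap (fun t => List.replicate m ("%" ++ t ++ "%"))) := by
  induction terms with
  | nil => exact absurd rfl h
  | cons t rest ih =>
    cases rest with
    | nil => simp [pvGo, pv_join_singleton]
    | cons t' rest' =>
      rw [show pvGo unit m (t :: t' :: rest')
            = (unit ++ " AND " ++ (pvGo unit m (t' :: rest')).1,
               List.replicate m ("%" ++ t ++ "%") ++ (pvGo unit m (t' :: rest')).2) from rfl,
          ih (by simp)]
      simp [pv_join_cons]

-- ===== VERDICT (by name: the statement is the Claim_ definition above) =====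
theorem build_po_search_clause_py_spec : Claim_equal_build_po_search_clause_py := by
  intro search fields _
  unfold Spec_build_po_search_clause_py build_po_search_clause_py build_po_search_clause_py_alt
  cases search with
  | none => rfl
  | some s =>
    by_cases hs : s = ""
    · simp [hs]
    · simp only [hs, if_false]
      set terms := (((PySem.Str.split? s ";").getD []).map PySem.Str.strip).filter (fun t => t ≠ "") with hterms
      set active := (match fields with
        | some fs => if fs = [] then pvAllKeys else fs
        | none => pvAllKeys) with hactive
      set vc := active.filterMap (fun k => pvPOFields.get? k) with hvc
      by_cases ht : terms = []
      · simp [ht]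
      · simp only [ht, if_false]
        by_cases hv : vc = []
        · rw [pv_outer_empty terms active (hvc.symm.trans hv)]
          simp [hv]
        · rw [pv_outer terms active vc hvc hv]
          simp only [hv, or_self, if_false, List.nil_append]
          rw [pv_go_eq _ _ _ ht, pv_ors_eq _ hv]
          have hrep : ∀ x : String, vc.map (fun _ => x) = List.replicate vc.length x := by
            intro x; simp [List.map_const']
          simp [hrep]
          exact ht
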